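-- pv_equiv track=rewrite | github.com/posl/comment_recommendation | script/mod_gen/5_time/zh/261_D/8.py | solve
-- ===== SOURCE A (Python) =====
-- def solve(n,m,x,c,y):
--     #dp[i][j]表示第i次投掷，连胜奖金为j时的最大金额
--     dp = [[0 for _ in range(n+1)] for _ in range(n+1)]
--     for i in range(n):
--         for j in range(n+1):
--             dp[i+1][j] = max(dp[i+1][j],dp[i][j])
--             if j < m and c[j] == i+1:
--                 dp[i+1][j+1] = max(dp[i+1][j+1],dp[i][j]+y[j])
--             dp[i+1][0] = max(dp[i+1][0],dp[i][j]+x[i])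
--     return max(dp[n])
-- ===== SOURCE B (Python) =====
-- def solve(n, m, x, c, y):
--     k = min(m, n)
--     if k < 0:
--         k = 0
--     hits = {}
--     for j in range(k):
--         hits.setdefault(c[j], []).append(j)
--     dp = [0] * (k + 1)
--     best = 0
--     for i in range(1, n + 1):
--         base = best
--         for j in reversed(hits.get(i, [])):
--             v = dp[j] + y[j]
--             if v > dp[j + 1]:
--                 dp[j + 1] = v
--                 if v > best:
--                     best = v
--         v = base + x[i - 1]
--         if v > dp[0]:
--             dp[0] = v
--             if v > best:
--                 best = v
--     return best
-- ===== Notes on version B (the rewrite author's own statement) =====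
-- stated objective: faster
-- what changed: A fills an (n+1)x(n+1) DP table, scanning all n+1 streak columns for every throw; B keeps a single 1D row of length min(m,n)+1 updated in place together with a running row maximum, and pre-indexes c into a dict so that at throw i only the streak positions j with c[j]==i are touched, making each step O(1+matches).
import Mathlib
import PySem

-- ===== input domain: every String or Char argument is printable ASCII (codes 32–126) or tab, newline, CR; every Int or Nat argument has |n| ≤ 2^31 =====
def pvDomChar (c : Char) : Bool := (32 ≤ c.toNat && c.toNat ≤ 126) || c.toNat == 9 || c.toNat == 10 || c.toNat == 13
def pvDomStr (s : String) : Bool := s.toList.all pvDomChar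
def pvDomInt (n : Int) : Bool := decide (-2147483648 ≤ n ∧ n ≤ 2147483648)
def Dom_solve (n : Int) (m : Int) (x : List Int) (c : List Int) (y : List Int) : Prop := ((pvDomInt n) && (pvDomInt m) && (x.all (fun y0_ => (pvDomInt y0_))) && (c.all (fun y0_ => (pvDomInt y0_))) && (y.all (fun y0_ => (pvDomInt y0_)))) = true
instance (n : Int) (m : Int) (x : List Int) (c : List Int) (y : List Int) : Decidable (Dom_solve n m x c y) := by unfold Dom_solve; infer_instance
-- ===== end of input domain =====

-- B replaces A's O(n^2)-cell DP table by a single in-place 1D row with a running maximum,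
-- touching streak cells only at the throws listed in a prebuilt index of c (objective: faster).

-- ===== PORT A =====
-- dp[i][j] read / write helpers for A's 2D list
def pvMget (dp : List (List Int)) (i j : Int) : Int :=
  PySem.List.pyGetD (PySem.List.pyGetD dp i []) j 0

def pvMset (dp : List (List Int)) (i j : Int) (v : Int) : List (List Int) :=
  dp.set i.toNat ((PySem.List.pyGetD dp i []).set j.toNat v)

-- the body of A's inner loop (the three statements, in order)
def pvInnerA (m : Int) (x c y : List Int) (i : Int) (dp : List (List Int)) (j : Int) : List (List Int) :=
  let d1 := pvMset dp (i+1) j (max (pvMget dp (i+1) j) (pvMget dp i j))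
  let d2 := if j < m ∧ PySem.List.pyGetD c j 0 = i + 1 then
      pvMset d1 (i+1) (j+1) (max (pvMget d1 (i+1) (j+1)) (pvMget d1 i j + PySem.List.pyGetD y j 0))
    else d1
  pvMset d2 (i+1) 0 (max (pvMget d2 (i+1) 0) (pvMget d2 i j + PySem.List.pyGetD x i 0))

def solve (n : Int) (m : Int) (x : List Int) (c : List Int) (y : List Int) : Int :=
  let dp0 := (PySem.List.pyRange 0 (n+1) 1).map (fun _ => (PySem.List.pyRange 0 (n+1) 1).map (fun _ => (0:Int)))
  let dp := (PySem.List.pyRange 0 n 1).foldl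
    (fun d i => (PySem.List.pyRange 0 (n+1) 1).foldl (pvInnerA m x c y i) d) dp0
  (PySem.List.max? (PySem.List.pyGetD dp n []) (fun v => v)).getD 0

-- ===== PORT B =====
def solve_alt (n : Int) (m : Int) (x : List Int) (c : List Int) (y : List Int) : Int :=
  let k0 := min m n
  let k := if k0 < 0 then 0 else k0
  let hits := (PySem.List.pyRange 0 k 1).foldl
    (fun (h : PySem.Dict Int (List Int)) j =>
      h.modify (PySem.List.pyGetD c j 0) [] (fun l => l ++ [j])) PySem.Dict.empty
  let st := (PySem.List.pyRange 1 (n+1) 1).foldl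
    (fun (st : List Int × Int) i =>
      let base := st.2
      let st2 := ((hits.getD i []).reverse).foldl
        (fun (st : List Int × Int) j =>
          let v := PySem.List.pyGetD st.1 j 0 + PySem.List.pyGetD y j 0
          if PySem.List.pyGetD st.1 (j+1) 0 < v then
            (st.1.set (j+1).toNat v, if st.2 < v then v else st.2)
          else st) st
      let v := base + PySem.List.pyGetD x (i-1) 0
      if PySem.List.pyGetD st2.1 0 0 < v then
        (st2.1.set 0 v, if st2.2 < v then v else st2.2)
      else st2)
    (List.replicate (k.toNat + 1) 0, 0)
  st.2

-- ===== PRECONDITION & SPEC =====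
-- Pre_solve is exactly the set of inputs on which the Python A returns normally: n ≥ 0 and
-- len(x) ≥ n (x[i] is read for every i < n); when n ≥ 1, c[j] is read for every j < min(m, n+1),
-- y[j] is read only for those j < min(m, n) whose bonus fires (1 ≤ c[j] ≤ n), and when m > n a
-- firing bonus at j = n would write dp[i+1][n+1], an IndexError.
def Pre_solve (n : Int) (m : Int) (x : List Int) (c : List Int) (y : List Int) : Prop :=
  0 ≤ n ∧ n ≤ (x.length : Int) ∧
  (1 ≤ n →
    min m (n+1) ≤ (c.length : Int) ∧
    (∀ j : Nat, j < (min m n).toNat → (1 ≤ c.getD j 0 ∧ c.getD j 0 ≤ n) → j < y.length) ∧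
    (n < m → ¬(1 ≤ c.getD n.toNat 0 ∧ c.getD n.toNat 0 ≤ n)))
instance (n : Int) (m : Int) (x : List Int) (c : List Int) (y : List Int) : Decidable (Pre_solve n m x c y) := by
  unfold Pre_solve; infer_instance

def pvWitness_solve : Int × Int × List Int × List Int × List Int := (3, 2, [1, 2, 3], [1, 3], [5, 4])

def Spec_solve (n : Int) (m : Int) (x : List Int) (c : List Int) (y : List Int) (out : Int) : Prop := out = solve_alt n m x c y
instance (n : Int) (m : Int) (x : List Int) (c : List Int) (y : List Int) (out : Int) : Decidable (Spec_solve n m x c y out) := by unfold Spec_solve; infer_instance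

-- ===== CLAIM (what is proved, stated in full; the proofs are below) =====
def Claim_equal_solve : Prop := ∀ (n : Int) (m : Int) (x : List Int) (c : List Int) (y : List Int), Dom_solve n m x c y → Pre_solve n m x c y → Spec_solve n m x c y (solve n m x c y)

-- ===== LEMMAS AND PROOFS =====

-- the reference recurrence both programs compute: pvRows t is A's dp row after t throws
def pvRmax (l : List Int) : Int := l.foldl max 0

abbrev pvHit (m : Int) (c : List Int) (s : Int) (j : Nat) : Prop := ((j : Int) < m ∧ c.getD j 0 = s)

def pvStep (m : Int) (x c y : List Int) (N : Nat) (i : Nat) (R : List Int) : List Int :=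
  (List.range (N+1)).map (fun q =>
    if q = 0 then max (R.getD 0 0) (pvRmax R + x.getD i 0)
    else if pvHit m c ((i : Int)+1) (q-1) then max (R.getD q 0) (R.getD (q-1) 0 + y.getD (q-1) 0)
    else R.getD q 0)

def pvRows (m : Int) (x c y : List Int) (N : Nat) : Nat → List Int
  | 0 => List.replicate (N+1) 0
  | t+1 => pvStep m x c y N t (pvRows m x c y N t)

def pvKI (m n : Int) : Int := if min m n < 0 then 0 else min m n

-- ---- generic list / max-fold facts ----
theorem pvExtGetD (l1 l2 : List Int) (hlen : l1.length = l2.length)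
    (h : ∀ q, q < l2.length → l1.getD q 0 = l2.getD q 0) : l1 = l2 := by
  apply List.ext_getElem hlen
  intro q h1 h2
  have hq := h q h2
  rwa [List.getD_eq_getElem _ 0 h1, List.getD_eq_getElem _ 0 h2] at hq

theorem pvGetD_set_self {α : Type} (l : List α) (d a : α) (q : Nat) (hq : q < l.length) :
    (l.set q a).getD q d = a := by
  rw [List.getD_eq_getElem _ _ (by simpa using hq)]
  exact List.getElem_set_self (by simpa using hq)

theorem pvGetD_set_ne {α : Type} (l : List α) (d a : α) (q r : Nat) (hne : q ≠ r) :
    (l.set q a).getD r d = l.getD r d := by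
  by_cases hr : r < l.length
  · rw [List.getD_eq_getElem _ _ (by simpa using hr), List.getD_eq_getElem _ _ hr]
    exact List.getElem_set_ne hne _
  · rw [List.getD_eq_default _ _ (by simp; omega), List.getD_eq_default _ _ (by omega)]

theorem pvSet_getD_self {α : Type} (l : List α) (d : α) (q : Nat) (hq : q < l.length) :
    l.set q (l.getD q d) = l := by
  rw [List.getD_eq_getElem l d hq, List.set_getElem_self]

theorem pvMapGetD (l : List Int) : (List.range l.length).map (fun q => l.getD q 0) = l := by
  apply List.ext_getElem (by simp)
  intro q h1 h2
  simp only [List.getElem_map, List.getElem_range]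
  rw [List.getD_eq_getElem l 0 h2]

theorem pvFoldlMax_shift (l : List Int) (a b : Int) :
    l.foldl max (max a b) = max (l.foldl max a) b := by
  induction l generalizing a with
  | nil => rfl
  | cons h t ih =>
      simp only [List.foldl_cons]
      rw [show max (max a b) h = max (max a h) b by omega, ih]

theorem pvRmax_nonneg (l : List Int) : 0 ≤ pvRmax l := by
  have := (PySem.List.le_foldl_max l 0).1
  simpa [pvRmax] using this

theorem pvGetD_le_rmax (l : List Int) (q : Nat) : l.getD q 0 ≤ pvRmax l := by
  by_cases h : q < l.length
  · have hm : l.getD q 0 ∈ l := by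
      rw [List.getD_eq_getElem l 0 h]; exact List.getElem_mem h
    exact (PySem.List.le_foldl_max l 0).2 _ hm
  · rw [List.getD_eq_default l 0 (by omega)]
    exact pvRmax_nonneg l

theorem pvRmax_le (l : List Int) (b : Int) (hb : 0 ≤ b) (h : ∀ v ∈ l, v ≤ b) : pvRmax l ≤ b := by
  unfold pvRmax
  induction l generalizing b with
  | nil => simpa
  | cons hd t ih =>
      simp only [List.foldl_cons]
      rw [pvFoldlMax_shift]
      have h1 := ih b hb (fun v hv => h v (List.mem_cons_of_mem _ hv))
      have h2 := h hd List.mem_cons_self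
      omega

theorem pvFoldlMax_set (l : List Int) (q : Nat) (v : Int) (hq : q < l.length)
    (hv : l.getD q 0 ≤ v) : ∀ a : Int, (l.set q v).foldl max a = max (l.foldl max a) v := by
  induction l generalizing q with
  | nil => simp at hq
  | cons hd t ih =>
      intro a
      cases q with
      | zero =>
          simp only [List.set_cons_zero, List.foldl_cons]
          simp only [List.getD_cons_zero] at hv
          rw [show max a v = max (max a hd) v by omega, pvFoldlMax_shift]
      | succ q =>
          simp only [List.set_cons_succ, List.foldl_cons]
          simp only [List.getD_cons_succ] at hv
          exact ih q (by simpa using hq) hv (max a hd)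

theorem pvRmax_set (l : List Int) (q : Nat) (hq : q < l.length) (v : Int)
    (hv : l.getD q 0 ≤ v) : pvRmax (l.set q v) = max (pvRmax l) v := by
  unfold pvRmax
  exact pvFoldlMax_set l q v hq hv 0

theorem pvRmax_replicate (k : Nat) : pvRmax (List.replicate k 0) = 0 := by
  have h1 := pvRmax_nonneg (List.replicate k (0:Int))
  have h2 := pvRmax_le (List.replicate k (0:Int)) 0 le_rfl
    (fun v hv => by rw [List.eq_of_mem_replicate hv])
  omega

theorem pvRmax_trunc (R : List Int) (K : Nat)
    (hzero : ∀ q, K < q → R.getD q 0 = 0) :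
    pvRmax ((List.range (K+1)).map (fun q => R.getD q 0)) = pvRmax R := by
  apply le_antisymm
  · apply pvRmax_le _ _ (pvRmax_nonneg R)
    intro v hv
    obtain ⟨q, _, rfl⟩ := List.mem_map.mp hv
    exact pvGetD_le_rmax R q
  · apply pvRmax_le _ _ (pvRmax_nonneg _)
    intro v hv
    obtain ⟨q, hql, hqe⟩ := List.mem_iff_getElem.mp hv
    have hvq : v = R.getD q 0 := by rw [List.getD_eq_getElem R 0 hql, hqe]
    by_cases hqK : q ≤ K
    · have hg : ((List.range (K+1)).map (fun q => R.getD q 0)).getD q 0 = R.getD q 0 := by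
        rw [List.getD_eq_getElem _ 0 (by simp; omega)]
        simp only [List.getElem_map, List.getElem_range]
      rw [hvq, ← hg]
      exact pvGetD_le_rmax _ q
    · rw [hvq, hzero q (by omega)]
      exact pvRmax_nonneg _

-- ---- facts about the reference rows ----
theorem pvRows_length (m : Int) (x c y : List Int) (N t : Nat) :
    (pvRows m x c y N t).length = N + 1 := by
  cases t with
  | zero => simp [pvRows]
  | succ t => simp [pvRows, pvStep]

theorem pvRows_nonneg (m : Int) (x c y : List Int) (N t : Nat) :
    ∀ q, 0 ≤ (pvRows m x c y N t).getD q 0 := by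
  induction t with
  | zero =>
      intro q
      by_cases hq : q < N+1
      · rw [List.getD_eq_getElem _ 0 (by rw [pvRows_length]; omega)]
        simp [pvRows]
      · rw [List.getD_eq_default _ 0 (by rw [pvRows_length]; omega)]
  | succ t ih =>
      intro q
      by_cases hq : q < N+1
      · rw [List.getD_eq_getElem _ 0 (by rw [pvRows_length]; omega)]
        have h1 := ih q
        have h2 := ih 0
        have h3 := ih (q-1)
        have h4 := pvRmax_nonneg (pvRows m x c y N t)
        simp only [pvRows, pvStep, List.getElem_map, List.getElem_range]
        split_ifs <;> omega
      · rw [List.getD_eq_default _ 0 (by rw [pvRows_length]; omega)]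

theorem pvRows_zero_beyond (m : Int) (x c y : List Int) (N t : Nat) (q : Nat)
    (hq : (m ≤ (q:Int) - 1) ∨ N + 1 ≤ q) (hq0 : 1 ≤ q) :
    (pvRows m x c y N t).getD q 0 = 0 := by
  rcases hq with hq | hq
  · induction t with
    | zero =>
        by_cases h : q < N + 1
        · rw [List.getD_eq_getElem _ 0 (by rw [pvRows_length]; omega)]
          simp [pvRows]
        · rw [List.getD_eq_default _ 0 (by rw [pvRows_length]; omega)]
    | succ t ih =>
        by_cases h : q < N + 1
        · rw [List.getD_eq_getElem _ 0 (by rw [pvRows_length]; omega)]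
          simp only [pvRows, pvStep, List.getElem_map, List.getElem_range]
          have hnothit : ¬ pvHit m c ((t:Int)+1) (q-1) := by
            rintro ⟨h1, _⟩
            omega
          rw [if_neg (by omega), if_neg hnothit]
          exact ih
        · rw [List.getD_eq_default _ 0 (by rw [pvRows_length]; omega)]
  · rw [List.getD_eq_default _ 0 (by rw [pvRows_length]; omega)]

theorem pvRows_zero_K (n m : Int) (x c y : List Int) (t q : Nat)
    (hq : (pvKI m n).toNat < q) : (pvRows m x c y n.toNat t).getD q 0 = 0 := by
  apply pvRows_zero_beyond
  · unfold pvKI at hq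
    split_ifs at hq <;> omega
  · have : 0 ≤ pvKI m n := by unfold pvKI; split_ifs <;> omega
    omega

theorem pvStep_getD (m : Int) (x c y : List Int) (N i : Nat) (R : List Int) (q : Nat)
    (hq : q ≤ N) :
    (pvStep m x c y N i R).getD q 0 =
      (if q = 0 then max (R.getD 0 0) (pvRmax R + x.getD i 0)
       else if pvHit m c ((i : Int)+1) (q-1) then max (R.getD q 0) (R.getD (q-1) 0 + y.getD (q-1) 0)
       else R.getD q 0) := by
  rw [List.getD_eq_getElem _ 0 (by simp [pvStep]; omega)]
  simp only [pvStep, List.getElem_map, List.getElem_range]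

-- =================== the A side ===================

def pvPmax (R : List Int) (t : Nat) : Int := ((List.range t).map (fun j => R.getD j 0)).foldl max 0

def pvPval (m : Int) (x c y R : List Int) (i : Nat) (t q : Nat) : Int :=
  if q = 0 then (if t = 0 then 0 else max (R.getD 0 0) (pvPmax R t + x.getD i 0))
  else max (if q < t then R.getD q 0 else 0)
           (if q ≤ t ∧ pvHit m c ((i:Int)+1) (q-1) then R.getD (q-1) 0 + y.getD (q-1) 0 else 0)

def pvProw (m : Int) (x c y R : List Int) (i : Nat) (N : Nat) (t : Nat) : List Int :=
  (List.range (N+1)).map (pvPval m x c y R i t)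

theorem pvProw_length (m : Int) (x c y R : List Int) (i N t : Nat) :
    (pvProw m x c y R i N t).length = N + 1 := by simp [pvProw]

theorem pvProw_getD (m : Int) (x c y R : List Int) (i N t q : Nat) (hq : q ≤ N) :
    (pvProw m x c y R i N t).getD q 0 = pvPval m x c y R i t q := by
  rw [List.getD_eq_getElem _ 0 (by simp [pvProw]; omega)]
  simp only [pvProw, List.getElem_map, List.getElem_range]

theorem pvPmax_succ (R : List Int) (t : Nat) :
    pvPmax R (t+1) = max (pvPmax R t) (R.getD t 0) := by
  unfold pvPmax
  rw [List.range_succ, List.map_append, List.foldl_append]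
  simp only [List.map_cons, List.map_nil, List.foldl_cons, List.foldl_nil]

theorem pvPmax_full (R : List Int) : pvPmax R R.length = pvRmax R := by
  unfold pvPmax pvRmax
  rw [pvMapGetD]

theorem pvProw_zero (m : Int) (x c y R : List Int) (i : Nat) (N : Nat) :
    pvProw m x c y R i N 0 = List.replicate (N+1) 0 := by
  unfold pvProw
  rw [List.eq_replicate_iff]
  refine ⟨by simp, ?_⟩
  intro b hb
  obtain ⟨a, _, rfl⟩ := List.mem_map.mp hb
  unfold pvPval
  split_ifs <;> omega

theorem pvProw_last (m : Int) (x c y R : List Int) (i : Nat) (N : Nat)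
    (hRlen : R.length = N+1) (hRnn : ∀ q, 0 ≤ R.getD q 0) :
    pvProw m x c y R i N (N+1) = pvStep m x c y N i R := by
  apply pvExtGetD _ _ (by simp [pvProw, pvStep])
  intro q hql
  rw [show (pvStep m x c y N i R).length = N+1 from by simp [pvStep]] at hql
  rw [pvProw_getD (hq := by omega), pvStep_getD (hq := by omega)]
  rcases Nat.eq_zero_or_pos q with rfl | hq1
  · rw [if_pos rfl]
    have e : pvPval m x c y R i (N+1) 0 = max (R.getD 0 0) (pvPmax R (N+1) + x.getD i 0) := by
      unfold pvPval
      rw [if_pos rfl, if_neg (Nat.succ_ne_zero N)]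
    rw [e, ← hRlen, pvPmax_full]
  · have hq0 : q ≠ 0 := by omega
    rw [if_neg hq0]
    have e : pvPval m x c y R i (N+1) q =
        max (if q < N+1 then R.getD q 0 else 0)
            (if q ≤ N+1 ∧ pvHit m c ((i:Int)+1) (q-1) then R.getD (q-1) 0 + y.getD (q-1) 0 else 0) := by
      unfold pvPval
      rw [if_neg hq0]
    rw [e, if_pos (by omega : q < N+1)]
    by_cases hh : pvHit m c ((i:Int)+1) (q-1)
    · rw [if_pos ⟨by omega, hh⟩, if_pos hh]
    · rw [if_neg (by rintro ⟨_, h2⟩; exact hh h2), if_neg hh]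
      have := hRnn q; omega

-- A's inner body, at loop index t, turns partial row t into partial row t+1 (bonus branch taken)
theorem pvProw_succ_hit (m : Int) (x c y R : List Int) (i N t : Nat) (ht : t ≤ N)
    (hRnn : ∀ q, 0 ≤ R.getD q 0)
    (hm : (t:Int) < m) (hc : c.getD t 0 = ((i:Int)+1))
    (P P1 P2 : List Int)
    (hP : P = pvProw m x c y R i N t)
    (hP1 : P1 = P.set t (max (P.getD t 0) (R.getD t 0)))
    (hP2 : P2 = P1.set (t+1) (max (P1.getD (t+1) 0) (R.getD t 0 + y.getD t 0))) :
    P2.set 0 (max (P2.getD 0 0) (R.getD t 0 + x.getD i 0)) = pvProw m x c y R i N (t+1) := by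
  have hPlen : P.length = N+1 := by rw [hP, pvProw_length]
  have hP1len : P1.length = N+1 := by rw [hP1, List.length_set, hPlen]
  have hP2len : P2.length = N+1 := by rw [hP2, List.length_set, hP1len]
  have hmm : pvHit m c ((i:Int)+1) t := ⟨hm, hc⟩
  apply pvExtGetD _ _ (by rw [List.length_set, hP2len, pvProw_length])
  intro q hql
  rw [pvProw_length] at hql
  rw [pvProw_getD (hq := by omega)]
  rcases Nat.eq_zero_or_pos q with rfl | hq1
  · rw [pvGetD_set_self _ _ _ _ (by omega)]
    have h20 : P2.getD 0 0 = P1.getD 0 0 := by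
      rw [hP2, pvGetD_set_ne _ _ _ _ _ (by omega)]
    have eR : pvPval m x c y R i (t+1) 0
        = max (R.getD 0 0) (max (pvPmax R t) (R.getD t 0) + x.getD i 0) := by
      unfold pvPval
      rw [if_pos rfl, if_neg (Nat.succ_ne_zero t), pvPmax_succ]
    rw [eR]
    by_cases ht0 : t = 0
    · subst ht0
      rw [h20, hP1, pvGetD_set_self _ _ _ _ (by omega), hP, pvProw_getD (hq := by omega)]
      have e : pvPval m x c y R i 0 0 = 0 := by unfold pvPval; rw [if_pos rfl, if_pos rfl]
      rw [e]
      have h0 := hRnn 0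
      have hp0 : pvPmax R 0 = 0 := rfl
      rw [hp0]
      omega
    · rw [h20, hP1, pvGetD_set_ne _ _ _ _ _ (by omega), hP, pvProw_getD (hq := by omega)]
      have e : pvPval m x c y R i t 0 = max (R.getD 0 0) (pvPmax R t + x.getD i 0) := by
        unfold pvPval; rw [if_pos rfl, if_neg ht0]
      rw [e]
      omega
  · have hq0 : q ≠ 0 := by omega
    rw [pvGetD_set_ne _ _ _ _ _ (by omega)]
    have eR : pvPval m x c y R i (t+1) q
        = max (if q < t+1 then R.getD q 0 else 0)
              (if q ≤ t+1 ∧ pvHit m c ((i:Int)+1) (q-1) then R.getD (q-1) 0 + y.getD (q-1) 0 else 0) := by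
      unfold pvPval
      rw [if_neg hq0]
    rw [eR]
    by_cases hq2 : q = t+1
    · subst hq2
      rw [if_neg (by omega), if_pos ⟨by omega, by simpa using hmm⟩]
      rw [hP2, pvGetD_set_self _ _ _ _ (by omega), hP1, pvGetD_set_ne _ _ _ _ _ (by omega), hP,
        pvProw_getD (hq := by omega)]
      have e : pvPval m x c y R i t (t+1) = max 0 0 := by
        unfold pvPval
        rw [if_neg (by omega), if_neg (by omega), if_neg (by rintro ⟨h, _⟩; omega)]
      rw [e]
      simp only [Nat.add_sub_cancel]
      omega
    · by_cases hq3 : q = t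
      · subst hq3
        rw [if_pos (by omega)]
        rw [hP2, pvGetD_set_ne _ _ _ _ _ (by omega), hP1, pvGetD_set_self _ _ _ _ (by omega), hP,
          pvProw_getD (hq := by omega)]
        have hnn := hRnn q
        by_cases hh : pvHit m c ((i:Int)+1) (q-1)
        · rw [if_pos ⟨by omega, hh⟩]
          have e : pvPval m x c y R i q q = max 0 (R.getD (q-1) 0 + y.getD (q-1) 0) := by
            unfold pvPval; rw [if_neg hq0, if_neg (by omega), if_pos ⟨le_rfl, hh⟩]
          rw [e]
          omega
        · rw [if_neg (by rintro ⟨_, h2⟩; exact hh h2)]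
          have e : pvPval m x c y R i q q = max 0 0 := by
            unfold pvPval; rw [if_neg hq0, if_neg (by omega), if_neg (by rintro ⟨_, h2⟩; exact hh h2)]
          rw [e]
          omega
      · rw [hP2, pvGetD_set_ne _ _ _ _ _ (by omega), hP1, pvGetD_set_ne _ _ _ _ _ (by omega), hP,
          pvProw_getD (hq := by omega)]
        have e : pvPval m x c y R i t q
            = max (if q < t then R.getD q 0 else 0)
                  (if q ≤ t ∧ pvHit m c ((i:Int)+1) (q-1) then R.getD (q-1) 0 + y.getD (q-1) 0 else 0) := by
          unfold pvPval; rw [if_neg hq0]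
        rw [e]
        simp only [show (q < t+1) ↔ (q < t) from by omega, show (q ≤ t+1) ↔ (q ≤ t) from by omega]

-- the same with the bonus branch not taken
theorem pvProw_succ_miss (m : Int) (x c y R : List Int) (i N t : Nat) (ht : t ≤ N)
    (hRnn : ∀ q, 0 ≤ R.getD q 0)
    (hmiss : ¬ pvHit m c ((i:Int)+1) t)
    (P P1 : List Int)
    (hP : P = pvProw m x c y R i N t)
    (hP1 : P1 = P.set t (max (P.getD t 0) (R.getD t 0))) :
    P1.set 0 (max (P1.getD 0 0) (R.getD t 0 + x.getD i 0)) = pvProw m x c y R i N (t+1) := by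
  have hPlen : P.length = N+1 := by rw [hP, pvProw_length]
  have hP1len : P1.length = N+1 := by rw [hP1, List.length_set, hPlen]
  apply pvExtGetD _ _ (by rw [List.length_set, hP1len, pvProw_length])
  intro q hql
  rw [pvProw_length] at hql
  rw [pvProw_getD (hq := by omega)]
  rcases Nat.eq_zero_or_pos q with rfl | hq1
  · rw [pvGetD_set_self _ _ _ _ (by omega)]
    have eR : pvPval m x c y R i (t+1) 0
        = max (R.getD 0 0) (max (pvPmax R t) (R.getD t 0) + x.getD i 0) := by
      unfold pvPval
      rw [if_pos rfl, if_neg (Nat.succ_ne_zero t), pvPmax_succ]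
    rw [eR]
    by_cases ht0 : t = 0
    · subst ht0
      rw [hP1, pvGetD_set_self _ _ _ _ (by omega), hP, pvProw_getD (hq := by omega)]
      have e : pvPval m x c y R i 0 0 = 0 := by unfold pvPval; rw [if_pos rfl, if_pos rfl]
      rw [e]
      have h0 := hRnn 0
      have hp0 : pvPmax R 0 = 0 := rfl
      rw [hp0]
      omega
    · rw [hP1, pvGetD_set_ne _ _ _ _ _ (by omega), hP, pvProw_getD (hq := by omega)]
      have e : pvPval m x c y R i t 0 = max (R.getD 0 0) (pvPmax R t + x.getD i 0) := by
        unfold pvPval; rw [if_pos rfl, if_neg ht0]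
      rw [e]
      omega
  · have hq0 : q ≠ 0 := by omega
    rw [pvGetD_set_ne _ _ _ _ _ (by omega)]
    have eR : pvPval m x c y R i (t+1) q
        = max (if q < t+1 then R.getD q 0 else 0)
              (if q ≤ t+1 ∧ pvHit m c ((i:Int)+1) (q-1) then R.getD (q-1) 0 + y.getD (q-1) 0 else 0) := by
      unfold pvPval
      rw [if_neg hq0]
    rw [eR]
    by_cases hq2 : q = t+1
    · subst hq2
      rw [if_neg (by omega), if_neg (by rintro ⟨_, h2⟩; exact hmiss (by simpa using h2))]
      rw [hP1, pvGetD_set_ne _ _ _ _ _ (by omega), hP, pvProw_getD (hq := by omega)]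
      have e : pvPval m x c y R i t (t+1) = max 0 0 := by
        unfold pvPval
        rw [if_neg (by omega), if_neg (by omega), if_neg (by rintro ⟨h, _⟩; omega)]
      rw [e]
    · by_cases hq3 : q = t
      · subst hq3
        rw [if_pos (by omega)]
        rw [hP1, pvGetD_set_self _ _ _ _ (by omega), hP, pvProw_getD (hq := by omega)]
        have hnn := hRnn q
        by_cases hh : pvHit m c ((i:Int)+1) (q-1)
        · rw [if_pos ⟨by omega, hh⟩]
          have e : pvPval m x c y R i q q = max 0 (R.getD (q-1) 0 + y.getD (q-1) 0) := by
            unfold pvPval; rw [if_neg hq0, if_neg (by omega), if_pos ⟨le_rfl, hh⟩]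
          rw [e]
          omega
        · rw [if_neg (by rintro ⟨_, h2⟩; exact hh h2)]
          have e : pvPval m x c y R i q q = max 0 0 := by
            unfold pvPval; rw [if_neg hq0, if_neg (by omega), if_neg (by rintro ⟨_, h2⟩; exact hh h2)]
          rw [e]
          omega
      · rw [hP1, pvGetD_set_ne _ _ _ _ _ (by omega), hP, pvProw_getD (hq := by omega)]
        have e : pvPval m x c y R i t q
            = max (if q < t then R.getD q 0 else 0)
                  (if q ≤ t ∧ pvHit m c ((i:Int)+1) (q-1) then R.getD (q-1) 0 + y.getD (q-1) 0 else 0) := by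
          unfold pvPval; rw [if_neg hq0]
        rw [e]
        simp only [show (q < t+1) ↔ (q < t) from by omega, show (q ≤ t+1) ↔ (q ≤ t) from by omega]

-- the A inner loop, processed up to j < T, equals "row i+1 := partial row T"
theorem pvInnerA_fold (n m : Int) (x c y : List Int) (_hn : 0 ≤ n) (i : Nat)
    (hiN : i < n.toNat) (D : List (List Int)) (hD : D.length = n.toNat + 1)
    (R : List Int) (hrowi : D.getD i [] = R) (hRlen : R.length = n.toNat + 1)
    (hRnn : ∀ q, 0 ≤ R.getD q 0)
    (hrowi1 : D.getD (i+1) [] = List.replicate (n.toNat+1) 0)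
    (T : Nat) (hT : T ≤ n.toNat + 1) :
    (PySem.List.pyRange 0 (T:Int) 1).foldl (pvInnerA m x c y (i:Int)) D
      = D.set (i+1) (pvProw m x c y R i n.toNat T) := by
  have hil : i + 1 < D.length := by omega
  induction T with
  | zero =>
      rw [show ((0:Nat):Int) = 0 from rfl,
        show PySem.List.pyRange 0 0 1 = [] from PySem.List.pyRange_one_eq_nil (by omega)]
      simp only [List.foldl_nil]
      rw [pvProw_zero, ← hrowi1, pvSet_getD_self _ _ _ hil]
  | succ T ih =>
      have ihT := ih (by omega)
      rw [show ((T+1:Nat):Int) = (T:Int)+1 from by push_cast; ring,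
        show PySem.List.pyRange 0 ((T:Int)+1) 1
            = PySem.List.pyRange 0 (T:Int) 1 ++ [(T:Int)] from
          PySem.List.pyRange_one_succ_right (by positivity),
        List.foldl_append, List.foldl_cons, List.foldl_nil, ihT]
      have eS : ∀ L : List Int, (D.set (i+1) L).getD (i+1) [] = L :=
        fun L => pvGetD_set_self D [] L (i+1) hil
      have eI : ∀ L : List Int, (D.set (i+1) L).getD i [] = R :=
        fun L => by rw [pvGetD_set_ne D [] L (i+1) i (by omega)]; exact hrowi
      simp only [pvInnerA, pvMget, pvMset]
      by_cases hcond : (T:Int) < m ∧ PySem.List.pyGetD c (T:Int) 0 = (i:Int) + 1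
      · rw [if_pos hcond]
        simp only [show ((T:Int)+1) = ((T+1:Nat):Int) from by push_cast; ring,
          show ((i:Int)+1) = ((i+1:Nat):Int) from by push_cast; ring,
          PySem.List.pyGetD_natCast, Int.toNat_natCast, Int.toNat_zero,
          PySem.List.pyGetD_zero, List.set_set, eS, eI]
        refine congrArg (D.set (i+1)) ?_
        refine pvProw_succ_hit m x c y R i n.toNat T (by omega) hRnn hcond.1 ?_ _ _ _ rfl rfl rfl
        have h2 := hcond.2
        rwa [PySem.List.pyGetD_natCast] at h2
      · rw [if_neg hcond]
        simp only [show ((i:Int)+1) = ((i+1:Nat):Int) from by push_cast; ring,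
          PySem.List.pyGetD_natCast, Int.toNat_natCast, Int.toNat_zero,
          PySem.List.pyGetD_zero, List.set_set, eS, eI]
        refine congrArg (D.set (i+1)) ?_
        refine pvProw_succ_miss m x c y R i n.toNat T (by omega) hRnn ?_ _ _ rfl rfl
        rintro ⟨h1, h2⟩
        exact hcond ⟨h1, by rw [PySem.List.pyGetD_natCast]; exact h2⟩

-- the A outer loop invariant
theorem pvOuterA (n m : Int) (x c y : List Int) (hn : 0 ≤ n) (t : Nat) (ht : t ≤ n.toNat) :
    ((PySem.List.pyRange 0 (t:Int) 1).foldl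
        (fun d i => (PySem.List.pyRange 0 (n+1) 1).foldl (pvInnerA m x c y i) d)
        ((PySem.List.pyRange 0 (n+1) 1).map
          (fun _ => (PySem.List.pyRange 0 (n+1) 1).map (fun _ => (0:Int))))).length = n.toNat + 1 ∧
    ((PySem.List.pyRange 0 (t:Int) 1).foldl
        (fun d i => (PySem.List.pyRange 0 (n+1) 1).foldl (pvInnerA m x c y i) d)
        ((PySem.List.pyRange 0 (n+1) 1).map
          (fun _ => (PySem.List.pyRange 0 (n+1) 1).map (fun _ => (0:Int))))).getD t []
      = pvRows m x c y n.toNat t ∧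
    ∀ u : Nat, t < u → u ≤ n.toNat →
      ((PySem.List.pyRange 0 (t:Int) 1).foldl
          (fun d i => (PySem.List.pyRange 0 (n+1) 1).foldl (pvInnerA m x c y i) d)
          ((PySem.List.pyRange 0 (n+1) 1).map
            (fun _ => (PySem.List.pyRange 0 (n+1) 1).map (fun _ => (0:Int))))).getD u []
        = List.replicate (n.toNat+1) 0 := by
  have hzrow : (PySem.List.pyRange 0 (n+1) 1).map (fun _ => (0:Int))
      = List.replicate (n.toNat+1) 0 := by
    rw [List.eq_replicate_iff]
    refine ⟨by rw [List.length_map, PySem.List.length_pyRange_one]; omega, ?_⟩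
    intro b hb
    obtain ⟨a, _, rfl⟩ := List.mem_map.mp hb
    rfl
  have hD0len : ((PySem.List.pyRange 0 (n+1) 1).map
      (fun _ => (PySem.List.pyRange 0 (n+1) 1).map (fun _ => (0:Int)))).length = n.toNat + 1 := by
    rw [List.length_map, PySem.List.length_pyRange_one]; omega
  have hD0row : ∀ u : Nat, u ≤ n.toNat →
      ((PySem.List.pyRange 0 (n+1) 1).map
        (fun _ => (PySem.List.pyRange 0 (n+1) 1).map (fun _ => (0:Int)))).getD u []
      = List.replicate (n.toNat+1) 0 := by
    intro u hu
    rw [List.getD_eq_getElem _ [] (by rw [hD0len]; omega), List.getElem_map, hzrow]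
  induction t with
  | zero =>
      rw [show ((0:Nat):Int) = 0 from rfl,
        show PySem.List.pyRange 0 0 1 = [] from PySem.List.pyRange_one_eq_nil (by omega)]
      simp only [List.foldl_nil]
      exact ⟨hD0len, by rw [hD0row 0 (by omega)]; rfl, fun u _ hu2 => hD0row u hu2⟩
  | succ t ih =>
      obtain ⟨ihlen, ihrow, ihz⟩ := ih (by omega)
      rw [show ((t+1:Nat):Int) = (t:Int)+1 from by push_cast; ring,
        show PySem.List.pyRange 0 ((t:Int)+1) 1
            = PySem.List.pyRange 0 (t:Int) 1 ++ [(t:Int)] from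
          PySem.List.pyRange_one_succ_right (by positivity),
        List.foldl_append, List.foldl_cons, List.foldl_nil]
      rw [show PySem.List.pyRange 0 (n+1) 1
          = PySem.List.pyRange 0 ((n.toNat+1 : Nat) : Int) 1 from by
        rw [show ((n.toNat+1 : Nat) : Int) = n+1 from by omega]] at ihlen ihrow ihz ⊢
      rw [pvInnerA_fold n m x c y hn t (by omega) _ ihlen (pvRows m x c y n.toNat t) ihrow
        (pvRows_length m x c y n.toNat t) (pvRows_nonneg m x c y n.toNat t)
        (ihz (t+1) (by omega) (by omega)) (n.toNat+1) le_rfl]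
      rw [pvProw_last m x c y _ t n.toNat (pvRows_length m x c y n.toNat t)
        (pvRows_nonneg m x c y n.toNat t),
        show pvStep m x c y n.toNat t (pvRows m x c y n.toNat t)
            = pvRows m x c y n.toNat (t+1) from rfl]
      refine ⟨by rw [List.length_set]; exact ihlen, ?_, ?_⟩
      · rw [pvGetD_set_self _ _ _ _ (by omega)]
      · intro u hu1 hu2
        rw [pvGetD_set_ne _ _ _ _ _ (by omega)]
        exact ihz u (by omega) hu2

-- A computes the reference recurrence
theorem pvSolveA (n m : Int) (x c y : List Int) (hn : 0 ≤ n) :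
    solve n m x c y = pvRmax (pvRows m x c y n.toNat n.toNat) := by
  obtain ⟨hlen, hrow, _⟩ := pvOuterA n m x c y hn n.toNat le_rfl
  simp only [solve]
  have egd : ∀ (dp : List (List Int)), PySem.List.pyGetD dp n [] = dp.getD n.toNat [] := by
    intro dp
    rw [show n = ((n.toNat : Nat) : Int) from by omega, PySem.List.pyGetD_natCast,
      Int.toNat_natCast]
  rw [show PySem.List.pyRange 0 n 1 = PySem.List.pyRange 0 ((n.toNat : Nat) : Int) 1 from by
      rw [Int.toNat_of_nonneg hn],
    egd _, hrow]
  have hlenR : (pvRows m x c y n.toNat n.toNat).length = n.toNat + 1 :=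
    pvRows_length m x c y n.toNat n.toNat
  obtain ⟨hd, tl, hcons⟩ := List.exists_cons_of_ne_nil
    (show pvRows m x c y n.toNat n.toNat ≠ [] by
      intro h; rw [h] at hlenR; simp at hlenR)
  have hd0 : 0 ≤ hd := by
    have := pvRows_nonneg m x c y n.toNat n.toNat 0
    rwa [hcons, List.getD_cons_zero] at this
  rw [hcons, PySem.List.max?_id_cons, Option.getD_some]
  unfold pvRmax
  simp only [List.foldl_cons]
  rw [show max (0:Int) hd = hd by omega]

-- =================== the B side ===================

-- the list stored in B's index for key s: the matching js, in increasing order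
theorem pvHits_getD (c : List Int) (k s : Int) :
    ((PySem.List.pyRange 0 k 1).foldl
        (fun (h : PySem.Dict Int (List Int)) j =>
          h.modify (PySem.List.pyGetD c j 0) [] (fun l => l ++ [j])) PySem.Dict.empty).getD s []
      = (PySem.List.pyRange 0 k 1).filter (fun j => PySem.List.pyGetD c j 0 == s) := by
  have h1 : (PySem.List.pyRange 0 k 1).foldl
      (fun (h : PySem.Dict Int (List Int)) j =>
        h.modify (PySem.List.pyGetD c j 0) [] (fun l => l ++ [j])) PySem.Dict.empty
    = ((PySem.List.pyRange 0 k 1).map (fun j => (PySem.List.pyGetD c j 0, j))).foldl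
        (fun (d : PySem.Dict Int (List Int)) p => d.modify p.1 [] (fun l => l ++ [p.2]))
        PySem.Dict.empty := by rw [List.foldl_map]
  rw [h1, PySem.Dict.getD_foldl_modify_append]
  simp [List.filter_map, List.map_map, Function.comp_def, PySem.Dict.getD_empty]

-- the effect of B's bonus loop over a decreasing list of matched positions
def pvBrow (y : List Int) (js : List Int) (K : Nat) (dp : List Int) : List Int :=
  (List.range (K+1)).map (fun (q : Nat) =>
    if q ≠ 0 ∧ ((q:Int) - 1) ∈ js then max (dp.getD q 0) (dp.getD (q-1) 0 + y.getD (q-1) 0)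
    else dp.getD q 0)

theorem pvBrow_length (y js : List Int) (K : Nat) (dp : List Int) :
    (pvBrow y js K dp).length = K + 1 := by simp [pvBrow]

theorem pvBrow_getD (y js : List Int) (K : Nat) (dp : List Int) (q : Nat) (hq : q ≤ K) :
    (pvBrow y js K dp).getD q 0 =
      (if q ≠ 0 ∧ ((q:Int) - 1) ∈ js then max (dp.getD q 0) (dp.getD (q-1) 0 + y.getD (q-1) 0)
       else dp.getD q 0) := by
  rw [List.getD_eq_getElem _ 0 (by rw [pvBrow_length]; omega)]
  simp only [pvBrow, List.getElem_map, List.getElem_range]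

theorem pvBump (dp : List Int) (best : Int) (q : Nat) (hq : q < dp.length) (v : Int)
    (hbest : best = pvRmax dp) :
    (if dp.getD q 0 < v then (dp.set q v, if best < v then v else best) else (dp, best))
      = (dp.set q (max (dp.getD q 0) v), pvRmax (dp.set q (max (dp.getD q 0) v))) := by
  have hle := pvGetD_le_rmax dp q
  rw [pvRmax_set dp q hq _ (le_max_left _ _)]
  subst hbest
  by_cases h1 : dp.getD q 0 < v
  · rw [if_pos h1, show max (dp.getD q 0) v = v by omega]
    have h2 : (if pvRmax dp < v then v else pvRmax dp) = max (pvRmax dp) v := by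
      split_ifs <;> omega
    rw [h2]
  · rw [if_neg h1, show max (dp.getD q 0) v = dp.getD q 0 by omega, pvSet_getD_self dp 0 q hq,
      show max (pvRmax dp) (dp.getD q 0) = pvRmax dp by omega]

theorem pvFoldB (y : List Int) (K : Nat) (js : List Int)
    (hmem : ∀ j ∈ js, 0 ≤ j ∧ j < (K:Int)) (hsort : js.Pairwise (fun a b => b < a))
    (dp : List Int) (hlen : dp.length = K+1) (best : Int) (hbest : best = pvRmax dp) :
    js.foldl (fun (st : List Int × Int) j =>
        let v := PySem.List.pyGetD st.1 j 0 + PySem.List.pyGetD y j 0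
        if PySem.List.pyGetD st.1 (j+1) 0 < v then
          (st.1.set (j+1).toNat v, if st.2 < v then v else st.2)
        else st) (dp, best)
      = (pvBrow y js K dp, pvRmax (pvBrow y js K dp)) := by
  induction js generalizing dp best with
  | nil =>
      simp only [List.foldl_nil]
      have hmapped : ∀ q : Nat, q ∈ List.range (K+1) →
          (if q ≠ 0 ∧ ((q:Int) - 1) ∈ ([] : List Int) then
            max (dp.getD q 0) (dp.getD (q-1) 0 + y.getD (q-1) 0) else dp.getD q 0)
          = dp.getD q 0 := by
        intro q _
        rw [if_neg]
        rintro ⟨_, h⟩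
        simp at h
      have hb : pvBrow y [] K dp = dp := by
        unfold pvBrow
        rw [List.map_congr_left hmapped, show K+1 = dp.length from hlen.symm]
        exact pvMapGetD dp
      rw [hb, hbest]
  | cons j js ih =>
      obtain ⟨hj0, hjK⟩ := hmem j List.mem_cons_self
      rw [List.pairwise_cons] at hsort
      obtain ⟨hlt, htail⟩ := hsort
      have hjn : j = ((j.toNat : Nat) : Int) := (Int.toNat_of_nonneg hj0).symm
      simp only [List.foldl_cons]
      rw [show PySem.List.pyGetD dp j 0 = dp.getD j.toNat 0 from by
          rw [hjn, PySem.List.pyGetD_natCast, Int.toNat_natCast],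
        show PySem.List.pyGetD y j 0 = y.getD j.toNat 0 from by
          rw [hjn, PySem.List.pyGetD_natCast, Int.toNat_natCast],
        show PySem.List.pyGetD dp (j+1) 0 = dp.getD (j.toNat+1) 0 from by
          rw [hjn, show ((j.toNat : Nat) : Int) + 1 = ((j.toNat+1 : Nat) : Int) from by push_cast; ring,
            PySem.List.pyGetD_natCast, Int.toNat_natCast],
        show (j+1).toNat = j.toNat + 1 from by omega]
      have hq1 : j.toNat + 1 < dp.length := by omega
      rw [pvBump dp best (j.toNat + 1) hq1 _ hbest]
      rw [ih (fun b hb => hmem b (List.mem_cons_of_mem _ hb)) htail _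
        (by rw [List.length_set]; exact hlen) _ rfl]
      suffices hEq : pvBrow y js K
          (dp.set (j.toNat + 1)
            (max (dp.getD (j.toNat + 1) 0) (dp.getD j.toNat 0 + y.getD j.toNat 0)))
          = pvBrow y (j :: js) K dp by rw [hEq]
      apply pvExtGetD _ _ (by rw [pvBrow_length, pvBrow_length])
      intro q hql
      rw [pvBrow_length] at hql
      rw [pvBrow_getD (hq := by omega), pvBrow_getD (hq := by omega)]
      by_cases hqj : q = j.toNat + 1
      · subst hqj
        have hnotin : ¬ (((j.toNat + 1 : Nat) : Int) - 1) ∈ js := by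
          intro hin
          have := hlt _ hin
          omega
        rw [if_neg (by rintro ⟨_, hin⟩; exact hnotin hin),
          if_pos ⟨by omega, by
            rw [show ((j.toNat + 1 : Nat) : Int) - 1 = j from by omega]
            exact List.mem_cons_self⟩]
        rw [pvGetD_set_self _ _ _ _ hq1]
        simp only [Nat.add_sub_cancel]
      · have hset1 : (dp.set (j.toNat + 1)
            (max (dp.getD (j.toNat + 1) 0) (dp.getD j.toNat 0 + y.getD j.toNat 0))).getD q 0
            = dp.getD q 0 := pvGetD_set_ne _ _ _ _ _ (by omega)
        by_cases hc : q ≠ 0 ∧ ((q:Int) - 1) ∈ js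
        · have hq1' : (q:Int) - 1 < j := hlt _ hc.2
          have hset2 : (dp.set (j.toNat + 1)
              (max (dp.getD (j.toNat + 1) 0) (dp.getD j.toNat 0 + y.getD j.toNat 0))).getD (q-1) 0
              = dp.getD (q-1) 0 := pvGetD_set_ne _ _ _ _ _ (by omega)
          rw [if_pos hc, if_pos ⟨hc.1, List.mem_cons_of_mem _ hc.2⟩, hset1, hset2]
        · rw [if_neg hc, if_neg ?_, hset1]
          rintro ⟨hq0, hmem'⟩
          rcases List.mem_cons.mp hmem' with heq | hin
          · exact hqj (by omega)
          · exact hc ⟨hq0, hin⟩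

def pvTrunc (m : Int) (x c y : List Int) (N K t : Nat) : List Int :=
  (List.range (K+1)).map (fun q => (pvRows m x c y N t).getD q 0)

theorem pvTrunc_length (m : Int) (x c y : List Int) (N K t : Nat) :
    (pvTrunc m x c y N K t).length = K + 1 := by simp [pvTrunc]

theorem pvTrunc_getD (m : Int) (x c y : List Int) (N K t q : Nat) (hq : q ≤ K) :
    (pvTrunc m x c y N K t).getD q 0 = (pvRows m x c y N t).getD q 0 := by
  rw [List.getD_eq_getElem _ 0 (by rw [pvTrunc_length]; omega)]
  simp only [pvTrunc, List.getElem_map, List.getElem_range]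

theorem pvHit_iff_KI (n m : Int) (c : List Int) (j : Nat) (hj : (j:Int) < n) (s : Int) :
    pvHit m c s j ↔ ((j:Int) < pvKI m n ∧ c.getD j 0 = s) := by
  unfold pvKI
  constructor
  · rintro ⟨h1, h2⟩
    refine ⟨?_, h2⟩
    split_ifs <;> omega
  · rintro ⟨h1, h2⟩
    refine ⟨?_, h2⟩
    split_ifs at h1 <;> omega

theorem pvOuterB (n m : Int) (x c y : List Int) (hn : 0 ≤ n)
    (H : PySem.Dict Int (List Int))
    (hH : ∀ s : Int, H.getD s []
        = (PySem.List.pyRange 0 (pvKI m n) 1).filter (fun j => PySem.List.pyGetD c j 0 == s))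
    (t : Nat) (ht : t ≤ n.toNat) :
    (PySem.List.pyRange 1 ((t:Int)+1) 1).foldl
      (fun (st : List Int × Int) i =>
        let base := st.2
        let st2 := ((H.getD i []).reverse).foldl
          (fun (st : List Int × Int) j =>
            let v := PySem.List.pyGetD st.1 j 0 + PySem.List.pyGetD y j 0
            if PySem.List.pyGetD st.1 (j+1) 0 < v then
              (st.1.set (j+1).toNat v, if st.2 < v then v else st.2)
            else st) st
        let v := base + PySem.List.pyGetD x (i-1) 0
        if PySem.List.pyGetD st2.1 0 0 < v then
          (st2.1.set 0 v, if st2.2 < v then v else st2.2)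
        else st2)
      (List.replicate ((pvKI m n).toNat + 1) 0, 0)
    = (pvTrunc m x c y n.toNat (pvKI m n).toNat t,
       pvRmax (pvTrunc m x c y n.toNat (pvKI m n).toNat t)) := by
  have hKI0 : 0 ≤ pvKI m n := by unfold pvKI; split_ifs <;> omega
  have hKIN : pvKI m n ≤ n := by unfold pvKI; split_ifs <;> omega
  induction t with
  | zero =>
      rw [show ((0:Nat):Int)+1 = 1 from by norm_num,
        show PySem.List.pyRange 1 1 1 = [] from PySem.List.pyRange_one_eq_nil (by omega)]
      simp only [List.foldl_nil]
      have hfst : pvTrunc m x c y n.toNat (pvKI m n).toNat 0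
          = List.replicate ((pvKI m n).toNat + 1) 0 := by
        unfold pvTrunc
        rw [List.eq_replicate_iff]
        refine ⟨by simp, ?_⟩
        intro b hb
        obtain ⟨q, hq, rfl⟩ := List.mem_map.mp hb
        by_cases h : q < n.toNat + 1
        · rw [List.getD_eq_getElem _ 0 (by rw [pvRows_length]; omega)]
          simp [pvRows]
        · rw [List.getD_eq_default _ 0 (by rw [pvRows_length]; omega)]
      rw [hfst, pvRmax_replicate]
  | succ t ih =>
      have iht := ih (by omega)
      rw [show ((t+1:Nat):Int)+1 = ((t:Int)+1)+1 from by push_cast; ring,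
        show PySem.List.pyRange 1 (((t:Int)+1)+1) 1
            = PySem.List.pyRange 1 ((t:Int)+1) 1 ++ [(t:Int)+1] from
          PySem.List.pyRange_one_succ_right (by omega),
        List.foldl_append, List.foldl_cons, List.foldl_nil, iht]
      simp only [hH ((t:Int)+1)]
      have hplt : ((PySem.List.pyRange 0 (pvKI m n) 1).filter
          (fun j => PySem.List.pyGetD c j 0 == (t:Int)+1)).Pairwise (fun a b => a < b) :=
        List.Pairwise.filter _ (PySem.List.pairwise_lt_pyRange_one 0 (pvKI m n))
      have hmem' : ∀ j ∈ ((PySem.List.pyRange 0 (pvKI m n) 1).filter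
          (fun j => PySem.List.pyGetD c j 0 == (t:Int)+1)).reverse,
          0 ≤ j ∧ j < (((pvKI m n).toNat : Nat) : Int) := by
        intro j hj
        rw [List.mem_reverse, List.mem_filter, PySem.List.mem_pyRange_one] at hj
        obtain ⟨⟨h1, h2⟩, _⟩ := hj
        exact ⟨h1, by omega⟩
      have hsort' : ((PySem.List.pyRange 0 (pvKI m n) 1).filter
          (fun j => PySem.List.pyGetD c j 0 == (t:Int)+1)).reverse.Pairwise
          (fun a b => b < a) := List.pairwise_reverse.mpr hplt
      rw [pvFoldB y (pvKI m n).toNat _ hmem' hsort' _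
        (pvTrunc_length m x c y n.toNat (pvKI m n).toNat t) _ rfl]
      simp only [show ((t:Int)+1-1) = ((t:Nat):Int) from by ring, PySem.List.pyGetD_natCast,
        PySem.List.pyGetD_zero]
      rw [pvBump _ _ 0 (by rw [pvBrow_length]; omega) _ rfl]
      have hrmaxt : pvRmax (pvTrunc m x c y n.toNat (pvKI m n).toNat t)
          = pvRmax (pvRows m x c y n.toNat t) := by
        unfold pvTrunc
        exact pvRmax_trunc _ _ (fun q hq => pvRows_zero_K n m x c y t q hq)
      have hEq : (pvBrow y ((PySem.List.pyRange 0 (pvKI m n) 1).filter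
            (fun j => PySem.List.pyGetD c j 0 == (t:Int)+1)).reverse (pvKI m n).toNat
            (pvTrunc m x c y n.toNat (pvKI m n).toNat t)).set 0
            (max ((pvBrow y ((PySem.List.pyRange 0 (pvKI m n) 1).filter
                (fun j => PySem.List.pyGetD c j 0 == (t:Int)+1)).reverse (pvKI m n).toNat
                (pvTrunc m x c y n.toNat (pvKI m n).toNat t)).getD 0 0)
              (pvRmax (pvTrunc m x c y n.toNat (pvKI m n).toNat t) + x.getD t 0))
          = pvTrunc m x c y n.toNat (pvKI m n).toNat (t+1) := by
        apply pvExtGetD _ _ (by rw [List.length_set, pvBrow_length, pvTrunc_length])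
        intro q hql
        rw [pvTrunc_length] at hql
        rw [pvTrunc_getD (hq := by omega),
          show pvRows m x c y n.toNat (t+1)
              = pvStep m x c y n.toNat t (pvRows m x c y n.toNat t) from rfl,
          pvStep_getD (hq := by omega)]
        rcases Nat.eq_zero_or_pos q with rfl | hq1
        · rw [pvGetD_set_self _ _ _ _ (by rw [pvBrow_length]; omega), if_pos rfl,
            pvBrow_getD (hq := by omega), if_neg (by rintro ⟨h0, _⟩; exact h0 rfl),
            pvTrunc_getD (hq := by omega), hrmaxt]
        · have hmemiff : (((q:Int) - 1) ∈ ((PySem.List.pyRange 0 (pvKI m n) 1).filter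
              (fun j => PySem.List.pyGetD c j 0 == (t:Int)+1)).reverse)
              ↔ pvHit m c ((t:Int)+1) (q-1) := by
            rw [List.mem_reverse, List.mem_filter, PySem.List.mem_pyRange_one]
            rw [show ((q:Int) - 1) = ((q-1 : Nat) : Int) from by omega,
              PySem.List.pyGetD_natCast]
            rw [pvHit_iff_KI n m c (q-1) (by omega) ((t:Int)+1)]
            constructor
            · rintro ⟨⟨h1, h2⟩, h3⟩
              exact ⟨h2, by simpa using h3⟩
            · rintro ⟨h1, h2⟩
              exact ⟨⟨by positivity, h1⟩, by simpa using h2⟩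
          rw [if_neg (show ¬ (q = 0) from by omega)]
          rw [pvGetD_set_ne _ _ _ _ _ (by omega), pvBrow_getD (hq := by omega)]
          by_cases hcnd : q ≠ 0 ∧ ((q:Int) - 1) ∈ ((PySem.List.pyRange 0 (pvKI m n) 1).filter
              (fun j => PySem.List.pyGetD c j 0 == (t:Int)+1)).reverse
          · have hh : pvHit m c ((t:Int)+1) (q-1) := hmemiff.mp hcnd.2
            rw [if_pos hcnd, if_pos hh, pvTrunc_getD (hq := by omega),
              pvTrunc_getD (hq := by omega)]
          · have hh : ¬ pvHit m c ((t:Int)+1) (q-1) := fun h => hcnd ⟨by omega, hmemiff.mpr h⟩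
            rw [if_neg hcnd, if_neg hh, pvTrunc_getD (hq := by omega)]
      rw [hEq]

-- B computes the reference recurrence
theorem pvSolveB (n m : Int) (x c y : List Int) (hn : 0 ≤ n) :
    solve_alt n m x c y = pvRmax (pvRows m x c y n.toNat n.toNat) := by
  simp only [solve_alt]
  rw [show (if min m n < 0 then (0:Int) else min m n) = pvKI m n from rfl]
  set H : PySem.Dict Int (List Int) := (PySem.List.pyRange 0 (pvKI m n) 1).foldl
    (fun (h : PySem.Dict Int (List Int)) j =>
      h.modify (PySem.List.pyGetD c j 0) [] (fun l => l ++ [j])) PySem.Dict.empty with hHd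
  have hH : ∀ s : Int, H.getD s []
      = (PySem.List.pyRange 0 (pvKI m n) 1).filter (fun j => PySem.List.pyGetD c j 0 == s) := by
    intro s
    rw [hHd]
    exact pvHits_getD c (pvKI m n) s
  rw [show (n+1 : Int) = ((n.toNat : Nat) : Int) + 1 from by omega]
  rw [pvOuterB n m x c y hn H hH n.toNat le_rfl]
  show pvRmax (pvTrunc m x c y n.toNat (pvKI m n).toNat n.toNat) = _
  unfold pvTrunc
  exact pvRmax_trunc _ _ (fun q hq => pvRows_zero_K n m x c y n.toNat q hq)

-- ===== VERDICT (by name: the statement is the Claim_ definition above) =====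
theorem solve_spec : Claim_equal_solve := by
  intro n m x c y _ hpre
  unfold Spec_solve
  rw [pvSolveA n m x c y hpre.1, pvSolveB n m x c y hpre.1]
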